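-- pv_equiv track=rewrite | github.com/jran-y/typing-test | main code/typing_test.py | swap_score
-- ===== SOURCE A (Python) =====
-- def swap_score(word1, word2):
--     num_changed = 0
--     if not word1 or not word2:
--         return 0
--     if word1[0] == word2[0]:
--         return swap_score(word1[1:], word2[1:])
--     else:
--         num_changed += 1
--         return num_changed + swap_score(word1[1:], word2[1:])
--     return num_changed
-- ===== SOURCE B (Python) =====
-- def swap_score(word1, word2):
--     num_changed = 0
--     for c1, c2 in zip(word1, word2):
--         if c1 != c2:
--             num_changed += 1
--     return num_changed
-- ===== Notes on version B (the rewrite author's own statement) =====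
-- stated objective: idiomatic
-- what changed: Replaced the slicing tail recursion with a flat accumulator loop over zip(word1, word2), counting mismatched positions directly.
import Mathlib
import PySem

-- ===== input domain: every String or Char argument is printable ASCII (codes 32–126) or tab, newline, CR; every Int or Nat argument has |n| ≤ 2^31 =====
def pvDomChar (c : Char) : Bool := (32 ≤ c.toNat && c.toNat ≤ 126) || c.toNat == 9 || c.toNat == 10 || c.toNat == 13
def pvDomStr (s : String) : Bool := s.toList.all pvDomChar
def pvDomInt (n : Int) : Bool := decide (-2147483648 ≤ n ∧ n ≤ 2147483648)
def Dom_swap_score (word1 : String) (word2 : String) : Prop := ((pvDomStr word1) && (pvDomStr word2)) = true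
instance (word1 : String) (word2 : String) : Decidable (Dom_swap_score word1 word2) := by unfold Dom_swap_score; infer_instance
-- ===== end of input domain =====

-- B replaces A's slicing tail recursion with a flat counter loop over zip (idiomatic; return-value equivalence).
-- ===== PORT A =====
-- A recurses on word[1:] slices of both strings; ported as structural recursion on the char lists.
def swapScoreRec : List Char → List Char → Int
  | [], _ => 0
  | _, [] => 0
  | c1 :: r1, c2 :: r2 =>
    if c1 == c2 then swapScoreRec r1 r2
    else 1 + swapScoreRec r1 r2

def swap_score (word1 : String) (word2 : String) : Int :=
  swapScoreRec word1.toList word2.toList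

-- ===== PORT B =====
-- B: counter accumulated over zip(word1, word2).
def swap_score_alt (word1 : String) (word2 : String) : Int :=
  (word1.toList.zip word2.toList).foldl
    (fun num_changed p => if p.1 ≠ p.2 then num_changed + 1 else num_changed) 0

-- ===== PRECONDITION & SPEC =====
def Spec_swap_score (word1 : String) (word2 : String) (out : Int) : Prop := out = swap_score_alt word1 word2
instance (word1 : String) (word2 : String) (out : Int) : Decidable (Spec_swap_score word1 word2 out) := by unfold Spec_swap_score; infer_instance

-- ===== CLAIM (what is proved, stated in full; the proofs are below) =====
def Claim_equal_swap_score : Prop := ∀ (word1 : String) (word2 : String), Dom_swap_score word1 word2 → Spec_swap_score word1 word2 (swap_score word1 word2)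

-- ===== LEMMAS AND PROOFS =====

-- ===== VERDICT (by name: the statement is the Claim_ definition above) =====
lemma foldl_zip_count (as bs : List Char) (n : Int) :
    (as.zip bs).foldl
      (fun num_changed p => if p.1 ≠ p.2 then num_changed + 1 else num_changed) n
      = n + swapScoreRec as bs := by
  induction as generalizing bs n with
  | nil => simp [swapScoreRec]
  | cons c1 r1 ih =>
    cases bs with
    | nil => simp [swapScoreRec]
    | cons c2 r2 =>
      simp only [List.zip_cons_cons, List.foldl_cons, swapScoreRec, ih]
      by_cases h : c1 = c2 <;> simp [h] <;> ring

theorem swap_score_spec : Claim_equal_swap_score := by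
  intro w1 w2 _
  unfold Spec_swap_score swap_score swap_score_alt
  rw [foldl_zip_count]
  ring
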